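-- pv_equiv track=rewrite | github.com/usnistgov/embedded3DPvids | py/file_handling.py | isStitch
-- ===== SOURCE A (Python) =====
-- def tripleLineSt() -> list:
--     '''get a list of triple line object types'''
--     # H = horiz, V = vertical
--     # I = in layer, O = out of layer
--     # P = parallel, B = bridge, C = cross
--     return ['HIB', 'HIPh', 'HIPxs', 'HOB', 'HOC', 'HOPh', 'HOPxs', 'VB', 'VC', 'VP']
--
-- def singleLineStN() -> list:
--     '''get a list of single line stitch names'''
--     return ['horizfull', 'vert1', 'vert2', 'vert3', 'vert4', 'xs1', 'xs2', 'xs3', 'xs4', 'xs5', 'horiz0', 'horiz1', 'horiz2']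
--
-- def isStitch(file:str) ->bool:
--     '''determine if the file is a stitched image'''
--     if not '.png' in file:
--         return False
--     if '_vid_' in file or '_vstill_' in file:
--         return False
--     for st in (singleLineStN()+tripleLineSt()):
--         if f'_{st}_' in file:
--             return True
-- ===== SOURCE B (Python) =====
-- STITCH_TYPES = frozenset(
--     ['horizfull', 'vert1', 'vert2', 'vert3', 'vert4', 'xs1', 'xs2', 'xs3', 'xs4', 'xs5',
--      'horiz0', 'horiz1', 'horiz2',
--      'HIB', 'HIPh', 'HIPxs', 'HOB', 'HOC', 'HOPh', 'HOPxs', 'VB', 'VC', 'VP'])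
--
-- def isStitch(file: str) -> bool:
--     '''determine if the file is a stitched image'''
--     if '.png' not in file:
--         return False
--     # tokens strictly between two underscores, found by one split instead of 25 substring scans
--     tokens = set(file.split('_')[1:-1])
--     if 'vid' in tokens or 'vstill' in tokens:
--         return False
--     if tokens & STITCH_TYPES:
--         return True
-- ===== Notes on version B (the rewrite author's own statement) =====
-- stated objective: alternative
-- what changed: Instead of scanning the filename 25 times for underscore-delimited name substrings (two guard names plus a 23-element loop), B splits the filename on underscore once, builds the set of interior tokens, and decides the guards and the stitch test by set membership / one set intersection.
import Mathlib
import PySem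

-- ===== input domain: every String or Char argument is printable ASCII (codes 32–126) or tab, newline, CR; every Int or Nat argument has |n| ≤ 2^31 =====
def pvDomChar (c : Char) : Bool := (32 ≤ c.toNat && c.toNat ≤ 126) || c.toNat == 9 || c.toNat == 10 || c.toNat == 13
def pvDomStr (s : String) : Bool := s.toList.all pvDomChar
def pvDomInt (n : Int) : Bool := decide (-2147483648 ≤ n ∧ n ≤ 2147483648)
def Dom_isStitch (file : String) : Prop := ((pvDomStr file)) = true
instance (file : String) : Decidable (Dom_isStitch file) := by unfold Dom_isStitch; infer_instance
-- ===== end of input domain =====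

-- B replaces A's 25 substring scans by a single split on underscore and set membership of the interior tokens (objective: alternative/idiomatic).
-- A returns None (ported as none) when no stitch name matches; both ports keep that.

-- ===== PORT A =====
def tripleLineSt : List String :=
  ["HIB", "HIPh", "HIPxs", "HOB", "HOC", "HOPh", "HOPxs", "VB", "VC", "VP"]

def singleLineStN : List String :=
  ["horizfull", "vert1", "vert2", "vert3", "vert4", "xs1", "xs2", "xs3", "xs4", "xs5", "horiz0", "horiz1", "horiz2"]

-- A's for-loop over the stitch names, falling through to None
def isStitchGo (file : String) : List String → Option Bool
  | [] => none
  | st :: rest =>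
      if PySem.Str.isIn ("_" ++ st ++ "_") file then some true else isStitchGo file rest

def isStitch (file : String) : Option Bool :=
  if !PySem.Str.isIn ".png" file then some false
  else if PySem.Str.isIn "_vid_" file || PySem.Str.isIn "_vstill_" file then some false
  else isStitchGo file (singleLineStN ++ tripleLineSt)

-- ===== PORT B =====
def stitchTypes : PySem.Set (List Char) :=
  PySem.Set.ofList
    ((["horizfull", "vert1", "vert2", "vert3", "vert4", "xs1", "xs2", "xs3", "xs4", "xs5",
       "horiz0", "horiz1", "horiz2",
       "HIB", "HIPh", "HIPxs", "HOB", "HOC", "HOPh", "HOPxs", "VB", "VC", "VP"]).map String.toList)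

-- tokens = set(file.split('_')[1:-1])
def stitchTokens (file : String) : PySem.Set (List Char) :=
  PySem.Set.ofList (((file.toList.splitOn '_').drop 1).dropLast)

def isStitch_alt (file : String) : Option Bool :=
  if !PySem.Str.isIn ".png" file then some false
  else if (stitchTokens file).contains "vid".toList || (stitchTokens file).contains "vstill".toList then some false
  else if !(PySem.Set.inter (stitchTokens file) stitchTypes).isEmpty then some true
  else none

-- ===== PRECONDITION & SPEC =====
def Spec_isStitch (file : String) (out : Option Bool) : Prop := out = isStitch_alt file
instance (file : String) (out : Option Bool) : Decidable (Spec_isStitch file out) := by unfold Spec_isStitch; infer_instance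

-- ===== CLAIM (what is proved, stated in full; the proofs are below) =====
def Claim_equal_isStitch : Prop := ∀ (file : String), Dom_isStitch file → Spec_isStitch file (isStitch file)

-- ===== LEMMAS AND PROOFS =====

-- the interior tokens of a string: everything strictly between two underscores
def pvInterior (cs : List Char) : List (List Char) :=
  ((List.splitOnP (· == '_') cs).drop 1).dropLast

-- t followed by a separator is a prefix of s iff t (separator-free) is the first split token and a separator exists
lemma prefix_iff_head (s : List Char) : ∀ (t : List Char), ('_' : Char) ∉ t →
    (t ++ ['_'] <+: s ↔ ∃ r, List.splitOnP (· == '_') s = t :: r ∧ r ≠ []) := by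
  induction s with
  | nil =>
      intro t _
      simp [List.splitOnP_nil, List.prefix_nil]
  | cons c s' ih =>
      intro t ht
      rw [List.splitOnP_cons]
      by_cases hc : c = '_'
      · subst hc
        simp only [BEq.rfl, if_pos]
        constructor
        · intro hp
          cases t with
          | nil => exact ⟨List.splitOnP (· == '_') s', rfl, List.splitOnP_ne_nil _ _⟩
          | cons a t' =>
              rw [List.cons_append, List.cons_prefix_cons] at hp
              exact (ht (by rw [hp.1]; simp)).elim
        · rintro ⟨r, hr, hrne⟩
          have : t = [] := by
            cases t with
            | nil => rfl
            | cons a t' => simp at hr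
          subst this
          simp
      · have hpc : (c == '_') = false := by simpa using hc
        rw [hpc]
        simp only [if_neg, Bool.false_eq_true, not_false_iff]
        cases hsp : List.splitOnP (· == '_') s' with
        | nil => exact absurd hsp (List.splitOnP_ne_nil _ _)
        | cons h tl =>
            simp only [List.modifyHead_cons]
            cases t with
            | nil =>
                simp only [List.nil_append]
                constructor
                · intro hp
                  rw [List.cons_prefix_cons] at hp
                  exact (hc hp.1.symm).elim
                · rintro ⟨r, hr, -⟩
                  simp at hr
            | cons a t' =>
                have ht' : ('_' : Char) ∉ t' := fun h => ht (List.mem_cons_of_mem _ h)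
                rw [List.cons_append, List.cons_prefix_cons]
                rw [ih t' ht', hsp]
                constructor
                · rintro ⟨rfl, r, hr, hrne⟩
                  obtain ⟨rfl, rfl⟩ := by simpa using hr
                  exact ⟨tl, by simp, hrne⟩
                · rintro ⟨r, hr, hrne⟩
                  obtain ⟨⟨rfl, rfl⟩, rfl⟩ := by simpa using hr
                  exact ⟨rfl, tl, rfl, hrne⟩

-- an underscore-delimited t is a substring of s iff t (separator-free) is an interior split token
lemma infix_iff_interior (s : List Char) : ∀ (t : List Char), ('_' : Char) ∉ t →
    ('_' :: (t ++ ['_']) <:+: s ↔ t ∈ pvInterior s) := by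
  induction s with
  | nil =>
      intro t _
      simp [pvInterior, List.splitOnP_nil]
  | cons c s' ih =>
      intro t ht
      rw [List.infix_cons_iff]
      unfold pvInterior
      rw [List.splitOnP_cons]
      by_cases hc : c = '_'
      · subst hc
        simp only [BEq.rfl, if_pos, List.drop_succ_cons, List.drop_zero]
        rw [List.cons_prefix_cons]
        cases hsp : List.splitOnP (· == '_') s' with
        | nil => exact absurd hsp (List.splitOnP_ne_nil _ _)
        | cons h tl =>
            have hpre := prefix_iff_head s' t ht
            rw [hsp] at hpre
            have hih := ih t ht
            unfold pvInterior at hih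
            rw [hsp] at hih
            simp only [List.drop_succ_cons, List.drop_zero] at hih
            cases tl with
            | nil =>
                simp only [List.dropLast_singleton, List.dropLast_nil, List.not_mem_nil, iff_false] at hih ⊢
                rintro (⟨-, hp⟩ | hinf)
                · rw [hpre] at hp
                  obtain ⟨r, hr, hrne⟩ := hp
                  obtain ⟨-, rfl⟩ := by simpa using hr
                  exact hrne rfl
                · exact hih hinf
            | cons h2 tl2 =>
                rw [List.dropLast_cons₂]
                simp only [List.mem_cons]
                constructor
                · rintro (⟨-, hp⟩ | hinf)
                  · rw [hpre] at hp
                    obtain ⟨r, hr, -⟩ := hp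
                    obtain ⟨rfl, -⟩ := by simpa using hr
                    exact Or.inl rfl
                  · exact Or.inr (hih.mp hinf)
                · rintro (rfl | hm)
                  · exact Or.inl ⟨trivial, hpre.mpr ⟨h2 :: tl2, rfl, by simp⟩⟩
                  · exact Or.inr (hih.mpr hm)
      · have hpc : (c == '_') = false := by simpa using hc
        rw [hpc]
        simp only [if_neg, Bool.false_eq_true, not_false_iff]
        cases hsp : List.splitOnP (· == '_') s' with
        | nil => exact absurd hsp (List.splitOnP_ne_nil _ _)
        | cons h tl =>
            simp only [List.modifyHead_cons, List.drop_succ_cons, List.drop_zero]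
            have hih := ih t ht
            unfold pvInterior at hih
            rw [hsp] at hih
            simp only [List.drop_succ_cons, List.drop_zero] at hih
            rw [← hih]
            constructor
            · rintro (hp | hinf)
              · rw [List.cons_prefix_cons] at hp
                exact (hc hp.1.symm).elim
              · exact hinf
            · exact Or.inr

-- bridge to the string-level substring test used by A
lemma isIn_name_iff (st file : String) (h : ('_' : Char) ∉ st.toList) :
    PySem.Str.isIn ("_" ++ st ++ "_") file = true ↔
      st.toList ∈ pvInterior file.toList := by
  rw [PySem.Str.isIn_iff_infix]
  have he : ("_" ++ st ++ "_").toList = '_' :: (st.toList ++ ['_']) := by simp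
  rw [he]
  exact infix_iff_interior file.toList st.toList h

-- A's loop returns some true iff some name occurs as an interior token, else none
lemma go_eq (file : String) : ∀ (l : List String), (∀ st ∈ l, ('_' : Char) ∉ st.toList) →
    isStitchGo file l =
      (if l.any (fun st => decide (st.toList ∈ pvInterior file.toList)) then some true else none) := by
  intro l
  induction l with
  | nil => intro _; simp [isStitchGo]
  | cons st rest ih =>
      intro hl
      have hst := hl st (by simp)
      have hrest : ∀ s ∈ rest, ('_' : Char) ∉ s.toList := fun s hs => hl s (List.mem_cons_of_mem _ hs)
      unfold isStitchGo
      by_cases hmem : st.toList ∈ pvInterior file.toList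
      · rw [if_pos ((isIn_name_iff st file hst).mpr hmem)]
        simp [hmem]
      · rw [if_neg (fun hc => hmem ((isIn_name_iff st file hst).mp hc)), ih hrest]
        simp [hmem]

-- ===== VERDICT (by name: the statement is the Claim_ definition above) =====
theorem isStitch_spec : Claim_equal_isStitch := by
  intro file _
  unfold Spec_isStitch isStitch isStitch_alt
  cases hpng : PySem.Str.isIn ".png" file with
  | false => simp
  | true =>
      simp only [Bool.not_true, Bool.false_eq_true, if_false]
      rw [show stitchTokens file = PySem.Set.ofList (pvInterior file.toList) from rfl]
      have hvid : PySem.Str.isIn "_vid_" file =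
          (PySem.Set.ofList (pvInterior file.toList)).contains "vid".toList := by
        rw [Bool.eq_iff_iff]
        rw [show ("_vid_" : String) = "_" ++ "vid" ++ "_" from rfl]
        rw [isIn_name_iff "vid" file (by decide), PySem.Set.contains_iff, PySem.Set.mem_ofList]
      have hvst : PySem.Str.isIn "_vstill_" file =
          (PySem.Set.ofList (pvInterior file.toList)).contains "vstill".toList := by
        rw [Bool.eq_iff_iff]
        rw [show ("_vstill_" : String) = "_" ++ "vstill" ++ "_" from rfl]
        rw [isIn_name_iff "vstill" file (by decide), PySem.Set.contains_iff, PySem.Set.mem_ofList]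
      rw [← hvid, ← hvst]
      by_cases hg : (PySem.Str.isIn "_vid_" file || PySem.Str.isIn "_vstill_" file) = true
      · rw [if_pos hg, if_pos hg]
      · rw [if_neg hg, if_neg hg]
        rw [go_eq file (singleLineStN ++ tripleLineSt) (by decide)]
        have hcond : ((singleLineStN ++ tripleLineSt).any
              (fun st => decide (st.toList ∈ pvInterior file.toList)))
            = !(PySem.Set.inter (PySem.Set.ofList (pvInterior file.toList)) stitchTypes).isEmpty := by
          rw [Bool.eq_iff_iff, Bool.not_eq_true', List.isEmpty_eq_false_iff_exists_mem]
          simp only [List.any_eq_true, decide_eq_true_eq]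
          constructor
          · rintro ⟨st, hstl, hmem⟩
            refine ⟨st.toList, ?_⟩
            show st.toList ∈ PySem.Set.inter (PySem.Set.ofList (pvInterior file.toList)) stitchTypes
            rw [PySem.Set.mem_inter, PySem.Set.mem_ofList]
            refine ⟨hmem, ?_⟩
            unfold stitchTypes
            rw [PySem.Set.mem_ofList]
            exact List.mem_map_of_mem hstl
          · rintro ⟨x, hx⟩
            have hx' : x ∈ PySem.Set.inter (PySem.Set.ofList (pvInterior file.toList)) stitchTypes := hx
            rw [PySem.Set.mem_inter, PySem.Set.mem_ofList] at hx'
            obtain ⟨hxi, hxs⟩ := hx'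
            unfold stitchTypes at hxs
            rw [PySem.Set.mem_ofList, List.mem_map] at hxs
            obtain ⟨st, hstl, rfl⟩ := hxs
            exact ⟨st, hstl, hxi⟩
        rw [hcond]
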